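-- pv_equiv track=rewrite | github.com/danielpkhalil/PokerRL | PokerDQN.py | is_pocket_pair
-- ===== SOURCE A (Python) =====
-- def is_pocket_pair(cards):
--     """
--     Detects if a player's cards form a pocket pair with no community cards.
--
--     Args:
--         cards: A binary vector of size 52 representing the player's hand and community cards.
--
--     Returns:
--         bool: True if the cards represent a pocket pair, False otherwise.
--     """
--     if sum(cards[:52]) != 2:
--         return False  # Ensure only two cards are present (pocket cards)
--
--     # Find the indices of the two cards
--     card_indices = [i for i, value in enumerate(cards[:52]) if value == 1]
--     if len(card_indices) != 2:
--         return False  # Invalid if not exactly 2 cards are present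
--
--     # Check if the two cards have the same rank
--     card_ranks = [index % 13 for index in card_indices]
--     return card_ranks[0] == card_ranks[1]
-- ===== SOURCE B (Python) =====
-- def is_pocket_pair(cards):
--     hand = cards[:52]
--     counts = [0] * 13
--     for i, v in enumerate(hand):
--         if v == 1:
--             counts[i % 13] += 1
--     return sum(hand) == 2 and sum(counts) == 2 and 2 in counts
-- ===== Notes on version B (the rewrite author's own statement) =====
-- stated objective: alternative
-- what changed: Replaces A's search for the two 1-indices and index%13 comparison by a 13-bucket rank-count histogram built in one pass; pair detection becomes 'some bucket holds 2' (with A's sum==2 and exactly-two-ones gates expressed as sum(hand)==2 and sum(counts)==2).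
import Mathlib
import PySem

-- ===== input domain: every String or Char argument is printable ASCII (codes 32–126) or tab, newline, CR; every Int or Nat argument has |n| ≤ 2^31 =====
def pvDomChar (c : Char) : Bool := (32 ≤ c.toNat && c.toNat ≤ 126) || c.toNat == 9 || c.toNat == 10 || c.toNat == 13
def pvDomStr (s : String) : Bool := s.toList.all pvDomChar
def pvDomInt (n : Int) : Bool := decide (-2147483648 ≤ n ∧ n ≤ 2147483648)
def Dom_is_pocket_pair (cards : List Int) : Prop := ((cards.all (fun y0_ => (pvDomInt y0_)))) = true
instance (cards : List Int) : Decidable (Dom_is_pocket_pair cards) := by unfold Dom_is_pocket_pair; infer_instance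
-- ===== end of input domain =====

-- B builds a 13-bucket rank-count histogram in one pass and tests 'some bucket holds 2',
-- instead of A's extraction of the two 1-indices and index%13 comparison; alternative, same cost.

-- ===== PORT A =====
def is_pocket_pair (cards : List Int) : Bool :=
  let sliced := PySem.List.slice cards none (some 52)
  if sliced.sum ≠ 2 then false
  else
    let card_indices := ((PySem.List.enumerate sliced).filter (fun p => p.2 == 1)).map (fun p => p.1)
    if card_indices.length ≠ 2 then false
    else
      let card_ranks := card_indices.map (fun i => PySem.Int.mod i 13)
      -- card_ranks[0] == card_ranks[1]; both indices are in range since length = 2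
      PySem.List.pyGet? card_ranks 0 == PySem.List.pyGet? card_ranks 1

-- ===== PORT B =====
-- counts[i % 13] += 1  (index is always in range: Python mod with divisor 13 lies in [0,13))
def pvIncAt (c : List Int) (j : Nat) : List Int := c.set j (c.getD j 0 + 1)

def is_pocket_pair_alt (cards : List Int) : Bool :=
  let hand := PySem.List.slice cards none (some 52)
  let counts := (PySem.List.enumerate hand).foldl
    (fun c p => if p.2 == 1 then pvIncAt c (PySem.Int.mod p.1 13).toNat else c)
    [0,0,0,0,0,0,0,0,0,0,0,0,0]
  hand.sum == 2 && counts.sum == 2 && counts.contains 2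

-- ===== PRECONDITION & SPEC =====
def Spec_is_pocket_pair (cards : List Int) (out : Bool) : Prop := out = is_pocket_pair_alt cards
instance (cards : List Int) (out : Bool) : Decidable (Spec_is_pocket_pair cards out) := by unfold Spec_is_pocket_pair; infer_instance

-- ===== CLAIM (what is proved, stated in full; the proofs are below) =====
def Claim_equal_is_pocket_pair : Prop := ∀ (cards : List Int), Dom_is_pocket_pair cards → Spec_is_pocket_pair cards (is_pocket_pair cards)

-- ===== LEMMAS AND PROOFS =====

/-- The Nat ranks (index mod 13) of the 1-valued entries of an enumerated list. -/
def pvRanks (l : List (Int × Int)) : List Nat :=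
  ((l.filter (fun p => p.2 == 1)).map (fun p => (PySem.Int.mod p.1 13).toNat))

/-- B's fold over the enumerated hand is the fold of `pvIncAt` over the rank list. -/
theorem pv_fold_ranks (l : List (Int × Int)) (c : List Int) :
    l.foldl (fun c p => if p.2 == 1 then pvIncAt c (PySem.Int.mod p.1 13).toNat else c) c
      = (pvRanks l).foldl pvIncAt c := by
  induction l generalizing c with
  | nil => rfl
  | cons p t ih =>
    simp only [pvRanks] at ih ⊢
    rw [List.foldl_cons, List.filter_cons]
    cases hb : (p.2 == 1) with
    | false => simp only [Bool.false_eq_true, if_false]; exact ih c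
    | true => simp only [if_true, List.map_cons, List.foldl_cons]; exact ih _

theorem pv_rank_lt (i : Int) : (PySem.Int.mod i 13).toNat < 13 := by
  have h1 := PySem.Int.mod_nonneg i (b := 13) (by norm_num)
  have h2 := PySem.Int.mod_lt i (b := 13) (by norm_num)
  omega

theorem pvIncAt_sum (c : List Int) (j : Nat) (hj : j < c.length) :
    (pvIncAt c j).sum = c.sum + 1 := by
  unfold pvIncAt
  rw [List.getD_eq_getElem c 0 hj]
  induction c generalizing j with
  | nil => simp at hj
  | cons a t ih =>
    cases j with
    | zero => simp; ring
    | succ k =>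
      simp only [List.set_cons_succ, List.sum_cons, List.getElem_cons_succ]
      rw [ih k (by simpa using hj)]
      ring

theorem pvIncAt_length (c : List Int) (j : Nat) : (pvIncAt c j).length = c.length := by
  simp [pvIncAt]

/-- Sum invariant of the histogram fold: with in-range ranks each step adds 1. -/
theorem pv_hist_sum (R : List Nat) (c : List Int) (hc : c.length = 13)
    (hR : ∀ j ∈ R, j < 13) :
    (R.foldl pvIncAt c).sum = c.sum + R.length := by
  induction R generalizing c with
  | nil => simp
  | cons j t ih =>
    simp only [List.foldl_cons]
    rw [ih (pvIncAt c j) (by rw [pvIncAt_length]; exact hc)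
        (fun x hx => hR x (List.mem_cons_of_mem _ hx))]
    rw [pvIncAt_sum c j (by rw [hc]; exact hR j (List.mem_cons_self))]
    simp only [List.length_cons]
    push_cast
    ring

/-- For exactly two in-range ranks, the histogram holds a 2 iff the ranks coincide. -/
theorem pv_hist_two : ∀ a : Nat, a < 13 → ∀ b : Nat, b < 13 →
    (([a, b].foldl pvIncAt [0,0,0,0,0,0,0,0,0,0,0,0,0]).contains (2 : Int)) = decide (a = b) := by
  decide

theorem pv_eq (cards : List Int) : is_pocket_pair cards = is_pocket_pair_alt cards := by
  unfold is_pocket_pair is_pocket_pair_alt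
  simp only []
  rw [pv_fold_ranks]
  set hand := PySem.List.slice cards none (some 52) with hh
  by_cases hs : hand.sum = 2
  · rw [if_neg (by omega : ¬ (hand.sum ≠ 2))]
    rw [show (hand.sum == 2) = true from by simp [hs], Bool.true_and]
    set E := PySem.List.enumerate hand with hE
    have hsum := pv_hist_sum (pvRanks E) [0,0,0,0,0,0,0,0,0,0,0,0,0] rfl
      (by intro j hj
          simp only [pvRanks, List.mem_map] at hj
          obtain ⟨p, _, hp⟩ := hj
          rw [← hp]; exact pv_rank_lt p.1)
    have hlen : ((E.filter (fun p => p.2 == 1)).map (fun p => p.1)).length = (pvRanks E).length := by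
      simp [pvRanks]
    by_cases h2 : (pvRanks E).length = 2
    · rw [if_neg (by rw [hlen]; omega : ¬ (((E.filter (fun p => p.2 == 1)).map (fun p => p.1)).length ≠ 2))]
      have hc2 : (((pvRanks E).foldl pvIncAt [0,0,0,0,0,0,0,0,0,0,0,0,0]).sum == 2) = true := by
        simp [hsum, h2]
      rw [hc2, Bool.true_and]
      -- pvRanks E has exactly two elements: unpack the filtered list
      obtain ⟨p, q, hF⟩ : ∃ p q, E.filter (fun p => p.2 == 1) = [p, q] :=
        List.length_eq_two.mp (by simpa [pvRanks] using h2)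
      rw [hF]
      simp only [pvRanks, hF, List.map_cons, List.map_nil]
      rw [pv_hist_two _ (pv_rank_lt p.1) _ (pv_rank_lt q.1)]
      have h1 := PySem.Int.mod_nonneg p.1 (b := 13) (by norm_num)
      have h2' := PySem.Int.mod_nonneg q.1 (b := 13) (by norm_num)
      simp only [PySem.List.pyGet?, PySem.List.pyIdx?]
      norm_num
      rcases eq_or_ne (p.1 % 13) (q.1 % 13) with he | he
      · simp [he]
      · rw [show (p.1 % 13 == q.1 % 13) = false from beq_eq_false_iff_ne.mpr he]
        symm
        rw [decide_eq_false_iff_not]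
        omega
    · rw [if_pos (by rw [hlen]; exact h2)]
      have : (((pvRanks E).foldl pvIncAt [0,0,0,0,0,0,0,0,0,0,0,0,0]).sum == 2) = false := by
        rw [hsum, beq_eq_false_iff_ne]
        norm_num
        omega
      simp [this]
  · rw [if_pos hs]
    rw [show (hand.sum == 2) = false from by simp [hs]]
    simp

-- ===== VERDICT (by name: the statement is the Claim_ definition above) =====
theorem is_pocket_pair_spec : Claim_equal_is_pocket_pair := by
  intro cards _
  unfold Spec_is_pocket_pair
  exact pv_eq cards
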